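-- pv_equiv track=rewrite | github.com/MurasatoNaoya/Python-Fundamentals- | Python Methods and Documentation/Tuple Unpacking with Python Functions.py | best_employee_checker
-- ===== SOURCE A (Python) =====
-- def best_employee_checker(workhours_tuple_list):
--
-- 	maximum_hours = 0				# Make sure that your base values are within the function (indented within the :) that you are defining.
-- 	employee_of_month = []
--
-- 	for name,hours in workhours_tuple_list: # Remember, the function creates a general form, so you don't need to have a specific list ot iterate through. You are setting up a process.
-- 		if hours > maximum_hours:
-- 			maximum_hours = hours
-- 			employee_of_month = name
-- 		else:
-- 			pass
--
-- 	return (employee_of_month, maximum_hours) # The return here just specifies the output of the function, remember, you have to; but can, define this as anything you would like.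
-- ===== SOURCE B (Python) =====
-- def best_employee_checker(workhours_tuple_list):
--     positives = [(name, hours) for name, hours in workhours_tuple_list if hours > 0]
--     return max(positives, key=lambda p: p[1])
-- ===== Notes on version B (the rewrite author's own statement) =====
-- stated objective: simpler
-- what changed: Replaces the manual running-maximum loop with a zero baseline and list-typed sentinel by a comprehension filtering the positive-hour entries followed by the built-in max(key=...), whose first-winner rule matches A's strict-> update.
-- outside the precondition, e.g. on best_employee_checker([('a', 0)]): A returns ([], 0), B raises ValueError; on best_employee_checker([]): A returns ([], 0), B raises ValueError
import Mathlib
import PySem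

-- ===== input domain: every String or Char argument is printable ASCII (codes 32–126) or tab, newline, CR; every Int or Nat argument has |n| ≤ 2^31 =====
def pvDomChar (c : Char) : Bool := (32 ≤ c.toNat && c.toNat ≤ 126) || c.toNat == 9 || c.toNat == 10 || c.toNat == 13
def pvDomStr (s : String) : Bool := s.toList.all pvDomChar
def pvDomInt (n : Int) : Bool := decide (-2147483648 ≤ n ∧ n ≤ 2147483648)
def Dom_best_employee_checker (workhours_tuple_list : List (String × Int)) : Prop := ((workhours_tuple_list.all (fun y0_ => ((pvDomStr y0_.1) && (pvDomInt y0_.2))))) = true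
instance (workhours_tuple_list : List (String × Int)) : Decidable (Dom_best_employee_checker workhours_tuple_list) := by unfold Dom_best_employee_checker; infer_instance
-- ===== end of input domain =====

-- B replaces A's manual running-maximum loop (zero baseline, list sentinel) by
-- filter-the-positives + built-in first-winner max; objective: simpler.

-- ===== PORT A =====
-- A's loop, step for step: state is (employee_of_month, maximum_hours); the Python
-- initial value [] for employee_of_month is not a String, so it is carried as
-- `none` (Option String); under Pre_ it is always overwritten before the return,
-- so the `.getD ""` extraction at the end is never reached on admitted inputs.
def bestGoA : List (String × Int) → Option String → Int → String × Int
  | [], emp, mx => (emp.getD "", mx)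
  | (name, hours) :: rest, emp, mx =>
      if mx < hours then bestGoA rest (some name) hours
      else bestGoA rest emp mx

def best_employee_checker (workhours_tuple_list : List (String × Int)) : String × Int :=
  bestGoA workhours_tuple_list none 0

-- ===== PORT B =====
-- Source B: positives = [(n,h) for n,h in l if h > 0]; return max(positives, key=p[1]).
-- Python's max raises ValueError on an empty sequence (outside Pre_); the port
-- returns ("", 0) there, which the claim never reaches.
def best_employee_checker_alt (workhours_tuple_list : List (String × Int)) : String × Int :=
  let positives := workhours_tuple_list.filter (fun p => decide (0 < p.2))
  match PySem.List.max? positives (fun p => p.2) with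
  | some m => m
  | none => ("", 0)

-- ===== PRECONDITION & SPEC =====
-- Pre_ excludes inputs with no positive-hours entry: there A returns ([], 0), in
-- which the employee slot is a list, not a value of the declared str type, and
-- B's max() raises ValueError on the empty filtered sequence.
def Pre_best_employee_checker (workhours_tuple_list : List (String × Int)) : Prop :=
  ∃ p ∈ workhours_tuple_list, 0 < p.2
instance (workhours_tuple_list : List (String × Int)) : Decidable (Pre_best_employee_checker workhours_tuple_list) := by unfold Pre_best_employee_checker; infer_instance

def pvWitness_best_employee_checker : (List (String × Int)) := [("ann", 3), ("bob", 7)]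

def Spec_best_employee_checker (workhours_tuple_list : List (String × Int)) (out : String × Int) : Prop := out = best_employee_checker_alt workhours_tuple_list
instance (workhours_tuple_list : List (String × Int)) (out : String × Int) : Decidable (Spec_best_employee_checker workhours_tuple_list out) := by unfold Spec_best_employee_checker; infer_instance

-- ===== CLAIM (what is proved, stated in full; the proofs are below) =====
def Claim_equal_best_employee_checker : Prop := ∀ (workhours_tuple_list : List (String × Int)), Dom_best_employee_checker workhours_tuple_list → Pre_best_employee_checker workhours_tuple_list → Spec_best_employee_checker workhours_tuple_list (best_employee_checker workhours_tuple_list)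

-- ===== LEMMAS AND PROOFS =====

-- the foldl step inside PySem.List.max? with key = second component
def maxStep (acc : Option (String × Int)) (x : String × Int) : Option (String × Int) :=
  match acc with
  | none => some x
  | some m => if m.2 < x.2 then some x else some m

lemma max?_eq_foldl (xs : List (String × Int)) :
    PySem.List.max? xs (fun p => p.2) = xs.foldl maxStep none := by
  unfold PySem.List.max?
  congr 1
  funext acc x
  cases acc <;> rfl

-- a fold of maxStep from a `some` state always yields `some`
lemma foldl_maxStep_some (u : List (String × Int)) : ∀ (b : String × Int),
    ∃ m, u.foldl maxStep (some b) = some m := by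
  induction u with
  | nil => intro b; exact ⟨b, rfl⟩
  | cons z w ihw =>
      intro b
      simp only [List.foldl_cons, maxStep]
      by_cases hz : b.2 < z.2 <;> simp only [hz, if_pos, if_neg, ite_true, ite_false] <;> exact ihw _

-- once the state is `some`, A's loop is exactly the max? fold
lemma goA_some (l : List (String × Int)) : ∀ (e : String) (mx : Int) (m : String × Int),
    l.foldl maxStep (some (e, mx)) = some m → bestGoA l (some e) mx = m := by
  induction l with
  | nil =>
      intro e mx m hm
      simp only [List.foldl_nil, Option.some.injEq] at hm
      simp [bestGoA, ← hm]
  | cons y t ih =>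
      intro e mx m hm
      obtain ⟨n, h⟩ := y
      by_cases hc : mx < h
      · simp only [List.foldl_cons, maxStep, hc, if_pos] at hm
        simpa [bestGoA, hc] using ih n h m hm
      · simp only [List.foldl_cons, maxStep, hc, if_neg] at hm
        simpa [bestGoA, hc] using ih e mx m hm

-- with a positive current maximum, non-positive entries never matter
lemma foldl_filter (l : List (String × Int)) : ∀ (b : String × Int), 0 < b.2 →
    l.foldl maxStep (some b) =
      (l.filter (fun p => decide (0 < p.2))).foldl maxStep (some b) := by
  induction l with
  | nil => intro b _; simp
  | cons y t ih =>
      intro b hb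
      by_cases hy : 0 < y.2
      · by_cases hc : b.2 < y.2
        · simp [List.foldl_cons, List.filter_cons, hy, maxStep, hc, ih y hy]
        · simp [List.foldl_cons, List.filter_cons, hy, maxStep, hc, ih b hb]
      · have hc : ¬ b.2 < y.2 := by omega
        simp [List.foldl_cons, List.filter_cons, hy, maxStep, hc, ih b hb]

lemma main_eq (l : List (String × Int)) (hpre : ∃ p ∈ l, 0 < p.2) :
    bestGoA l none 0 = best_employee_checker_alt l := by
  induction l with
  | nil => simp at hpre
  | cons y t ih =>
      obtain ⟨n, h⟩ := y
      by_cases hy : (0:Int) < h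
      · -- head is positive: both sides start the real maximum from (n, h)
        obtain ⟨m, hm⟩ := foldl_maxStep_some (t.filter (fun p => decide (0 < p.2))) (n, h)
        have hA : bestGoA ((n, h) :: t) none 0 = m := by
          simp only [bestGoA, hy, if_pos]
          exact goA_some t n h m (by rw [foldl_filter t (n, h) hy]; exact hm)
        have hB : best_employee_checker_alt ((n, h) :: t) = m := by
          simp only [best_employee_checker_alt, max?_eq_foldl, List.filter_cons,
            decide_eq_true_eq, hy, if_pos, List.foldl_cons]
          have : maxStep none (n, h) = some (n, h) := rfl
          rw [this, hm]
        rw [hA, hB]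
      · -- head not positive: A skips it, the filter drops it
        have hrest : ∃ p ∈ t, 0 < p.2 := by
          obtain ⟨p, hp, hpp⟩ := hpre
          rcases List.mem_cons.mp hp with rfl | hp'
          · exact absurd hpp hy
          · exact ⟨p, hp', hpp⟩
        have hcond : ¬ (0:Int) < h := hy
        simp only [bestGoA, if_neg hcond]
        rw [ih hrest]
        simp [best_employee_checker_alt, List.filter_cons, hy]

-- ===== VERDICT (by name: the statement is the Claim_ definition above) =====
theorem best_employee_checker_spec : Claim_equal_best_employee_checker := by
  intro l _ hpre
  unfold Spec_best_employee_checker best_employee_checker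
  exact main_eq l hpre
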